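-- pv_equiv track=rewrite | github.com/xphade/aoc2021 | 14_extended-polymerization.py | count_pairs_and_characters
-- ===== SOURCE A (Python) =====
-- from collections import defaultdict
-- from typing import DefaultDict, Dict, Tuple
--
-- def count_pairs_and_characters(
--     template: str,
-- ) -> Tuple[DefaultDict[str, int], DefaultDict[str, int]]:
--     """Count the pairs and single characters in the given `template`"""
--     pair_count: DefaultDict[str, int] = defaultdict(int)
--     for i in range(len(template) - 1):
--         pair = template[i : i + 2]
--         pair_count[pair] += 1
--
--     char_count: DefaultDict[str, int] = defaultdict(
--         int, {c: template.count(c) for c in set(template)}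
--     )
--
--     return (pair_count, char_count)
-- ===== SOURCE B (Python) =====
-- from collections import defaultdict
--
--
-- def count_pairs_and_characters(template):
--     """Count the pairs and single characters in the given `template`."""
--     pair_count = defaultdict(int)
--     char_count = defaultdict(int)
--     for i in range(len(template) - 1):
--         pair_count[template[i : i + 2]] += 1
--         char_count[template[i]] += 1
--     if template:
--         char_count[template[-1]] += 1
--     return (pair_count, char_count)
-- ===== Notes on version B (the rewrite author's own statement) =====
-- stated objective: alternative
-- what changed: One fused pass derives the character counts from the pair traversal (each char counted as the first of its pair, plus one for the final char), instead of a separate set(template)/template.count(c) scan per distinct character.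
import Mathlib
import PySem

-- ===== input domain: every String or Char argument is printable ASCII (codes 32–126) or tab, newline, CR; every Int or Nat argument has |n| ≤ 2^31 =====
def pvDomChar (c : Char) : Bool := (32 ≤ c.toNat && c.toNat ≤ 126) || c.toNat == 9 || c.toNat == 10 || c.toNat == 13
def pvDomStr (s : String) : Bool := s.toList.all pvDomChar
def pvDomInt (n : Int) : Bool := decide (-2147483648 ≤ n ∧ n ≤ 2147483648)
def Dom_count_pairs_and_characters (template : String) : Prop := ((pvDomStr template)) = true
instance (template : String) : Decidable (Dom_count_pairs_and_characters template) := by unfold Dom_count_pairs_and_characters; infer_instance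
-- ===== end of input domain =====

-- B fuses the two passes: character counts are derived from the pair traversal
-- (each character counted as the first of its pair, plus one for the final character),
-- instead of A's separate set(template)/template.count(c) scan per distinct character.


-- shared trivial primitive: the 1-character string template[i] / a 2-character slice as a String
def pvChr (c : Char) : String := String.ofList [c]

-- ===== PORT A =====
def count_pairs_and_characters (template : String) : (List (String × Int)) × (List (String × Int)) :=
  let cs := template.toList
  -- for i in range(len(template) - 1): pair_count[template[i:i+2]] += 1
  let pair_count : PySem.Dict String Int :=
    (PySem.List.pyRange 0 (PySem.Str.len template - 1) 1).foldl
      (fun d i => d.modify (String.ofList (PySem.List.slice cs (some i) (some (i + 2)))) 0 (· + 1))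
      PySem.Dict.empty
  -- {c: template.count(c) for c in set(template)}
  let char_count : PySem.Dict String Int :=
    (PySem.Set.ofList cs).foldl
      (fun d c => d.insert (pvChr c) ((PySem.List.count cs c : Int)))
      PySem.Dict.empty
  (pair_count.items, char_count.items)

-- ===== PORT B =====
def count_pairs_and_characters_alt (template : String) : (List (String × Int)) × (List (String × Int)) :=
  let cs := template.toList
  -- one fused loop: for i in range(len(template) - 1): pair_count[template[i:i+2]] += 1; char_count[template[i]] += 1
  let st :=
    (PySem.List.pyRange 0 (PySem.Str.len template - 1) 1).foldl
      (fun (s : PySem.Dict String Int × PySem.Dict String Int) i =>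
        (s.1.modify (String.ofList (PySem.List.slice cs (some i) (some (i + 2)))) 0 (· + 1),
         s.2.modify (pvChr (PySem.List.pyGetD cs i ' ')) 0 (· + 1)))
      (PySem.Dict.empty, PySem.Dict.empty)
  -- if template: char_count[template[-1]] += 1
  let char_count :=
    if cs = [] then st.2 else st.2.modify (pvChr (PySem.List.pyGetD cs (-1) ' ')) 0 (· + 1)
  (st.1.items, char_count.items)

-- ===== PRECONDITION & SPEC =====
def Spec_count_pairs_and_characters (template : String) (out : (List (String × Int)) × (List (String × Int))) : Prop := out = count_pairs_and_characters_alt template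
instance (template : String) (out : (List (String × Int)) × (List (String × Int))) : Decidable (Spec_count_pairs_and_characters template out) := by unfold Spec_count_pairs_and_characters; infer_instance

-- ===== CLAIM (what is proved, stated in full; the proofs are below) =====
def Claim_equal_count_pairs_and_characters : Prop := ∀ (template : String), Dom_count_pairs_and_characters template → Spec_count_pairs_and_characters template (count_pairs_and_characters template)

-- ===== LEMMAS AND PROOFS =====

theorem pvChr_injective : Function.Injective pvChr := by
  intro a b h
  simpa [pvChr] using congrArg String.toList h

-- set(map f xs) = map f (set(xs)) for injective f
theorem pvSet_ofList_map {α β : Type} [BEq α] [LawfulBEq α] [BEq β] [LawfulBEq β]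
    (f : α → β) (hf : Function.Injective f) (xs : List α) :
    PySem.Set.ofList (xs.map f) = (PySem.Set.ofList xs).map f := by
  induction xs with
  | nil => rfl
  | cons x xs ih =>
    rw [List.map_cons, PySem.Set.ofList_cons, PySem.Set.ofList_cons, ih]
    simp only [PySem.Set.discard, List.filter_map, List.map_cons, List.cons.injEq, true_and]
    exact congrArg (List.map f) (List.filter_congr (fun y _ => by simp [hf.eq_iff]))

-- folding fresh-keyed inserts appends the items in order
theorem pvItems_foldl_insert (l : List Char) (g : Char → Int) (d : PySem.Dict String Int)
    (hnd : (l.map pvChr).Nodup) (hfresh : ∀ c ∈ l, d.contains (pvChr c) = false) :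
    (l.foldl (fun d c => d.insert (pvChr c) (g c)) d).items
      = d.items ++ l.map (fun c => (pvChr c, g c)) := by
  induction l generalizing d with
  | nil => simp
  | cons c l ih =>
    simp only [List.map_cons, List.nodup_cons] at hnd
    have hfc : d.contains (pvChr c) = false := hfresh c (List.mem_cons_self)
    have hitems := PySem.Dict.items_insert_of_not_contains d (g c) hfc
    rw [List.foldl_cons, ih (d.insert (pvChr c) (g c)) hnd.2, hitems]
    · simp
    · intro c' hc'
      rw [PySem.Dict.contains_insert]
      have hne : pvChr c' ≠ pvChr c := by
        intro h
        exact hnd.1 (h ▸ List.mem_map_of_mem hc')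
      simp [hne, hfresh c' (List.mem_cons_of_mem _ hc')]

-- A's char dict: items = one entry per distinct char, in first-occurrence order
theorem pvCharA (cs : List Char) :
    ((PySem.Set.ofList cs).foldl
      (fun d c => d.insert (pvChr c) ((PySem.List.count cs c : Int))) PySem.Dict.empty).items
      = (PySem.Set.ofList cs).map (fun c => (pvChr c, (List.count c cs : Int))) := by
  rw [pvItems_foldl_insert]
  · simp only [PySem.Dict.empty, List.nil_append]
    exact List.map_congr_left (fun c _ => by rw [PySem.List.count_eq])
  · exact (PySem.Set.nodup_ofList cs).map pvChr_injective
  · intro c _; exact PySem.Dict.contains_empty _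

-- B's char dict is the counter of all characters (as 1-char strings), hence the same items
theorem pvCharB (cs : List Char) :
    (cs.foldl (fun d c => d.modify (pvChr c) 0 (· + 1)) PySem.Dict.empty).items
      = (PySem.Set.ofList cs).map (fun c => (pvChr c, (List.count c cs : Int))) := by
  have h1 : cs.foldl (fun d c => d.modify (pvChr c) 0 (· + 1)) PySem.Dict.empty
      = PySem.Dict.counter (cs.map pvChr) := by
    rw [PySem.Dict.counter, List.foldl_map]
  rw [h1, PySem.Dict.items_counter, pvSet_ofList_map pvChr pvChr_injective]
  rw [List.map_map]
  exact List.map_congr_left (fun c _ => by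
    simp [List.count_map_of_injective _ pvChr pvChr_injective])

-- B's index loop over range(n-1) followed by the final increment folds over all of cs
theorem pvCharB_loop (cs : List Char) (hne : cs ≠ []) :
    (if cs = [] then
        (PySem.List.pyRange 0 ((cs.length : Int) - 1) 1).foldl
          (fun d i => d.modify (pvChr (PySem.List.pyGetD cs i ' ')) 0 (· + 1)) (PySem.Dict.empty : PySem.Dict String Int)
      else
        ((PySem.List.pyRange 0 ((cs.length : Int) - 1) 1).foldl
          (fun d i => d.modify (pvChr (PySem.List.pyGetD cs i ' ')) 0 (· + 1)) (PySem.Dict.empty : PySem.Dict String Int)).modify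
          (pvChr (PySem.List.pyGetD cs (-1) ' ')) 0 (· + 1))
      = cs.foldl (fun d c => d.modify (pvChr c) 0 (· + 1)) PySem.Dict.empty := by
  rw [if_neg hne]
  have hlen : (cs.length : Int) - 1 = (cs.dropLast.length : Int) := by
    have : 1 ≤ cs.length := List.length_pos_iff.mpr hne
    simp [List.length_dropLast]
    omega
  rw [hlen]
  rw [PySem.List.foldl_congr_mem _
      (fun d i => PySem.Dict.modify d (pvChr (PySem.List.pyGetD cs i ' ')) 0 (· + 1))
      (fun d i => PySem.Dict.modify d (pvChr (PySem.List.pyGetD cs.dropLast i ' ')) 0 (· + 1))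
      PySem.Dict.empty ?_]
  · rw [PySem.List.foldl_pyRange_zero_pyGetD' cs.dropLast ' '
        (fun d c => PySem.Dict.modify d (pvChr c) 0 (· + 1)) PySem.Dict.empty]
    rw [PySem.List.pyGetD_neg_one cs ' ' hne]
    have : ∀ (l : List Char) (x : Char) (d : PySem.Dict String Int),
        (l.foldl (fun d c => d.modify (pvChr c) 0 (· + 1)) d).modify (pvChr x) 0 (· + 1)
          = (l ++ [x]).foldl (fun d c => d.modify (pvChr c) 0 (· + 1)) d := by
      intro l x d; rw [List.foldl_append, List.foldl_cons, List.foldl_nil]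
    rw [this, List.dropLast_append_getLast hne]
  · intro acc i hi
    rw [PySem.List.mem_pyRange_one] at hi
    have hi' : i < (cs.dropLast.length : Int) := hi.2
    have h1 : PySem.List.pyGetD cs i ' ' = cs[i.toNat]'(by
      rw [List.length_dropLast] at hi'; omega) :=
      PySem.List.pyGetD_eq_getElem cs ' ' hi.1 (by rw [List.length_dropLast] at hi'; omega)
    have h2 : PySem.List.pyGetD cs.dropLast i ' ' = cs.dropLast[i.toNat]'(by omega) :=
      PySem.List.pyGetD_eq_getElem cs.dropLast ' ' hi.1 (by omega)
    simp only [h1, h2, List.getElem_dropLast]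

-- ===== VERDICT (by name: the statement is the Claim_ definition above) =====
theorem count_pairs_and_characters_spec : Claim_equal_count_pairs_and_characters := by
  intro template _
  unfold Spec_count_pairs_and_characters count_pairs_and_characters count_pairs_and_characters_alt
  dsimp only
  rw [PySem.List.foldl_prod_mk
    (fun (d : PySem.Dict String Int) (i : Int) =>
      d.modify (String.ofList (PySem.List.slice template.toList (some i) (some (i + 2)))) 0 (· + 1))
    (fun (d : PySem.Dict String Int) (i : Int) =>
      d.modify (pvChr (PySem.List.pyGetD template.toList i ' ')) 0 (· + 1))]
  refine Prod.ext rfl ?_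
  simp only [PySem.Str.len_eq]
  by_cases hne : template.toList = []
  · simp [hne, PySem.List.pyRange_one_eq_nil, PySem.Set.ofList_nil, PySem.Dict.empty]
  · rw [pvCharA, ← pvCharB, ← pvCharB_loop template.toList hne]
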